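-- pv_equiv track=rewrite | github.com/jgvhabets/lid_opm | combined_analysis_bachelor/code/functions_for_pipeline.py | take_out_short_off_onset
-- ===== SOURCE A (Python) =====
-- def take_out_short_off_onset(onsets, offsets, min_time_period, sampling_freq):
--     onsets_clean = onsets.copy()
--     offsets_clean = offsets.copy()
--     min_sample_period = min_time_period * sampling_freq
--
--     if hasattr(onsets, 'tolist'):
--         onsets_clean = onsets.tolist()
--         offsets_clean = offsets.tolist()
--
--     for i in range(len(offsets) - 2, -1, -1):
--         time_between = onsets[i + 1] - offsets[i]
--         if time_between <= min_sample_period: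
--             del onsets_clean[i + 1]
--             del offsets_clean[i]
--
--     return onsets_clean, offsets_clean
-- ===== SOURCE B (Python) =====
-- def take_out_short_off_onset(onsets, offsets, min_time_period, sampling_freq):
--     min_sample_period = min_time_period * sampling_freq
--     n = len(offsets)
--     drop = {i for i in range(n - 1) if onsets[i + 1] - offsets[i] <= min_sample_period}
--     onsets_clean = [x for j, x in enumerate(onsets) if j - 1 not in drop]
--     offsets_clean = [x for j, x in enumerate(offsets) if j not in drop]
--     return onsets_clean, offsets_clean
-- ===== Notes on version B (the rewrite author's own statement) =====
-- stated objective: alternative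
-- what changed: A deletes short-gap pairs from list copies in a backward loop with repeated in-place 'del' operations; B marks the short-gap indices in a set in one forward pass over the original arrays and rebuilds both lists by comprehension.
import Mathlib
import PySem

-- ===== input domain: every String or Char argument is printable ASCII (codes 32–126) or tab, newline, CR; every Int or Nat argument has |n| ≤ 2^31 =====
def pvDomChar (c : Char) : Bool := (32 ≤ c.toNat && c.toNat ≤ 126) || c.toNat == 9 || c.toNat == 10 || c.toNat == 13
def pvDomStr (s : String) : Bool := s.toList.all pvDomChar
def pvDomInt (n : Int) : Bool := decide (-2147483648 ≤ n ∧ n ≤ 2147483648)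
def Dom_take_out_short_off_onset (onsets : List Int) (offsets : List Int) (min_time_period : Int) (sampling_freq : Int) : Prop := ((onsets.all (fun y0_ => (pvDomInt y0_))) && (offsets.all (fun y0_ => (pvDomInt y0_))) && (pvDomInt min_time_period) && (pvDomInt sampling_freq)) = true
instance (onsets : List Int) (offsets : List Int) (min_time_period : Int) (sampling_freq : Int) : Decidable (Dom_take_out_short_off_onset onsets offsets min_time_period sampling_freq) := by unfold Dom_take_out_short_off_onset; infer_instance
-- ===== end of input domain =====

-- B replaces A's backward delete-in-place loop by one forward pass that marks the short-gap
-- indices in a set and rebuilds both lists by comprehension (objective: alternative; avoids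
-- A's repeated in-place deletions, which cost O(n) each in the worst case).

-- ===== PORT A =====
-- A's loop body: reads onsets[i+1], offsets[i] from the ORIGINAL lists, deletes from the
-- clean copies ('del' = PySem.List.pop?); 'none' = Python raised (IndexError).
def bodyA (onsets offsets : List Int) (msp : Int)
    (st : Option (List Int × List Int)) (i : Int) : Option (List Int × List Int) :=
  match st with
  | none => none
  | some (onC, offC) =>
    match PySem.List.pyGet? onsets (i + 1), PySem.List.pyGet? offsets i with
    | some on1, some off0 =>
      if on1 - off0 ≤ msp then
        match PySem.List.pop? onC (i + 1) with
        | none => none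
        | some (_, onC') =>
          match PySem.List.pop? offC i with
          | none => none
          | some (_, offC') => some (onC', offC')
      else some (onC, offC)
    | _, _ => none

def take_out_short_off_onset (onsets : List Int) (offsets : List Int) (min_time_period : Int) (sampling_freq : Int) : List Int × List Int :=
  let min_sample_period := min_time_period * sampling_freq
  -- hasattr(onsets, 'tolist') is False for Python lists: that branch is a no-op here
  let res : Option (List Int × List Int) :=
    (PySem.List.pyRange ((offsets.length : Int) - 2) (-1) (-1)).foldl
      (bodyA onsets offsets min_sample_period) (some (onsets, offsets))
  res.getD (onsets, offsets)  -- 'none' is unreachable under Pre_ (Python raises there)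

-- ===== PORT B =====
-- B's first pass: collect the short-gap indices i of range(len(offsets)-1) into a set.
def bodyB (onsets offsets : List Int) (msp : Int)
    (acc : Option (PySem.Set Int)) (i : Int) : Option (PySem.Set Int) :=
  match acc with
  | none => none
  | some d =>
    match PySem.List.pyGet? onsets (i + 1), PySem.List.pyGet? offsets i with
    | some on1, some off0 => if on1 - off0 ≤ msp then some (PySem.Set.add d i) else some d
    | _, _ => none

def take_out_short_off_onset_alt (onsets : List Int) (offsets : List Int) (min_time_period : Int) (sampling_freq : Int) : List Int × List Int :=
  let min_sample_period := min_time_period * sampling_freq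
  let drop? : Option (PySem.Set Int) :=
    (PySem.List.pyRange 0 ((offsets.length : Int) - 1) 1).foldl
      (bodyB onsets offsets min_sample_period) (some PySem.Set.empty)
  match drop? with
  | none => ([], [])  -- unreachable under Pre_ (Python raises there)
  | some drop =>
    ((PySem.List.enumerate onsets).filterMap
        (fun jx => if jx.1 - 1 ∈ drop then none else some jx.2),
     (PySem.List.enumerate offsets).filterMap
        (fun jx => if jx.1 ∈ drop then none else some jx.2))

-- ===== PRECONDITION & SPEC =====
-- Pre_ excludes exactly the inputs on which Python A raises IndexError (onsets[i+1] with
-- onsets shorter than offsets while the loop runs); B raises on exactly the same inputs.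
def Pre_take_out_short_off_onset (onsets : List Int) (offsets : List Int) (min_time_period : Int) (sampling_freq : Int) : Prop :=
  offsets.length ≤ 1 ∨ offsets.length ≤ onsets.length
instance (onsets : List Int) (offsets : List Int) (min_time_period : Int) (sampling_freq : Int) : Decidable (Pre_take_out_short_off_onset onsets offsets min_time_period sampling_freq) := by unfold Pre_take_out_short_off_onset; infer_instance

def pvWitness_take_out_short_off_onset : List Int × List Int × Int × Int :=
  ([0, 10, 40, 60], [5, 30, 55], 2, 3)

def Spec_take_out_short_off_onset (onsets : List Int) (offsets : List Int) (min_time_period : Int) (sampling_freq : Int) (out : List Int × List Int) : Prop := out = take_out_short_off_onset_alt onsets offsets min_time_period sampling_freq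
instance (onsets : List Int) (offsets : List Int) (min_time_period : Int) (sampling_freq : Int) (out : List Int × List Int) : Decidable (Spec_take_out_short_off_onset onsets offsets min_time_period sampling_freq out) := by unfold Spec_take_out_short_off_onset; infer_instance

-- ===== CLAIM (what is proved, stated in full; the proofs are below) =====
def Claim_equal_take_out_short_off_onset : Prop := ∀ (onsets : List Int) (offsets : List Int) (min_time_period : Int) (sampling_freq : Int), Dom_take_out_short_off_onset onsets offsets min_time_period sampling_freq → Pre_take_out_short_off_onset onsets offsets min_time_period sampling_freq → Spec_take_out_short_off_onset onsets offsets min_time_period sampling_freq (take_out_short_off_onset onsets offsets min_time_period sampling_freq)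

-- ===== LEMMAS AND PROOFS =====

-- the short-gap test at off-index j, read from the original arrays
def dropB (ons offs : List Int) (msp : Int) (j : Nat) : Bool :=
  decide (ons.getD (j + 1) 0 - offs.getD j 0 ≤ msp)

-- kept onset indices 1..k / kept offset indices 0..k-1, as values
def keptOns (ons offs : List Int) (msp : Int) (k : Nat) : List Int :=
  ((List.range' 1 k).filter (fun j => !dropB ons offs msp (j - 1))).map (fun j => ons.getD j 0)
def keptOffs (ons offs : List Int) (msp : Int) (k : Nat) : List Int :=
  ((List.range' 0 k).filter (fun j => !dropB ons offs msp j)).map (fun j => offs.getD j 0)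

-- the marked indices after B's first pass over range(m)
def Dm (ons offs : List Int) (msp : Int) (m : Nat) : List Int :=
  ((List.range m).filter (dropB ons offs msp)).map (fun j => (j : Int))

theorem pop_boundary (pre : List Int) (a : Int) (X : List Int) :
    PySem.List.pop? (pre ++ a :: X) ((pre.length : Nat) : Int) = some (a, pre ++ X) := by
  rw [PySem.List.pop?_natCast (pre ++ a :: X) pre.length (by simp)]
  simp [List.getElem_append_right, List.eraseIdx_append_of_length_le (le_refl pre.length)]

theorem A_loop (ons offs : List Int) (msp : Int) (k : Nat) (X Y : List Int)
    (hk : k + 1 ≤ offs.length) (hlen : offs.length ≤ ons.length) :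
    (PySem.List.pyRange ((k : Int) - 1) (-1) (-1)).foldl (bodyA ons offs msp)
      (some (ons.take (k + 1) ++ X, offs.take k ++ Y))
    = some (ons.take 1 ++ keptOns ons offs msp k ++ X, keptOffs ons offs msp k ++ Y) := by
  induction k generalizing X Y with
  | zero =>
    rw [show ((0 : Nat) : Int) - 1 = -1 by norm_num,
      PySem.List.pyRange_neg_one_eq_nil (by norm_num)]
    simp [keptOns, keptOffs]
  | succ k ih =>
    rw [show ((k + 1 : Nat) : Int) - 1 = (k : Int) by push_cast; ring,
      PySem.List.pyRange_neg_one_cons (by omega), List.foldl_cons]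
    have hg1 : PySem.List.pyGet? ons ((k : Int) + 1) = some (ons.getD (k + 1) 0) := by
      rw [show ((k : Int) + 1) = ((k + 1 : Nat) : Int) by push_cast; ring,
        PySem.List.pyGet?_natCast, List.getElem?_eq_getElem (by omega),
        List.getD_eq_getElem _ _ (by omega)]
    have hg0 : PySem.List.pyGet? offs (k : Int) = some (offs.getD k 0) := by
      rw [PySem.List.pyGet?_natCast, List.getElem?_eq_getElem (by omega),
        List.getD_eq_getElem _ _ (by omega)]
    have htk1 : ons.take (k + 1 + 1) = ons.take (k + 1) ++ [ons.getD (k + 1) 0] := by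
      rw [List.take_add_one, List.getElem?_eq_getElem (by omega),
        List.getD_eq_getElem _ _ (by omega)]
      rfl
    have htk0 : offs.take (k + 1) = offs.take k ++ [offs.getD k 0] := by
      rw [List.take_add_one, List.getElem?_eq_getElem (by omega),
        List.getD_eq_getElem _ _ (by omega)]
      rfl
    have hlon : (ons.take (k + 1)).length = k + 1 := by simp; omega
    have hlof : (offs.take k).length = k := by simp; omega
    rw [show bodyA ons offs msp (some (ons.take (k + 1 + 1) ++ X, offs.take (k + 1) ++ Y)) (k : Int)
        = (match PySem.List.pyGet? ons ((k : Int) + 1), PySem.List.pyGet? offs (k : Int) with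
          | some on1, some off0 =>
            if on1 - off0 ≤ msp then
              match PySem.List.pop? (ons.take (k + 1 + 1) ++ X) ((k : Int) + 1) with
              | none => none
              | some (_, onC') =>
                match PySem.List.pop? (offs.take (k + 1) ++ Y) (k : Int) with
                | none => none
                | some (_, offC') => some (onC', offC')
            else some (ons.take (k + 1 + 1) ++ X, offs.take (k + 1) ++ Y)
          | _, _ => none) from rfl]
    rw [hg1, hg0]
    dsimp only
    by_cases h : ons.getD (k + 1) 0 - offs.getD k 0 ≤ msp
    · rw [if_pos h]
      have hp1 : PySem.List.pop? (ons.take (k + 1 + 1) ++ X) ((k : Int) + 1)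
          = some (ons.getD (k + 1) 0, ons.take (k + 1) ++ X) := by
        rw [htk1, List.append_assoc, List.singleton_append,
          show ((k : Int) + 1) = (((ons.take (k + 1)).length : Nat) : Int) by
            rw [hlon]; push_cast; ring,
          pop_boundary]
      have hp0 : PySem.List.pop? (offs.take (k + 1) ++ Y) (k : Int)
          = some (offs.getD k 0, offs.take k ++ Y) := by
        rw [htk0, List.append_assoc, List.singleton_append,
          show ((k : Int)) = (((offs.take k).length : Nat) : Int) by rw [hlof],
          pop_boundary]
      rw [hp1]; dsimp only; rw [hp0]; dsimp only
      rw [ih X Y (by omega)]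
      have hd : dropB ons offs msp k = true := by
        simp only [dropB, List.getD_eq_getElem?_getD] at h ⊢; simp; omega
      simp [keptOns, keptOffs, List.range'_concat, hd]
    · rw [if_neg h]
      rw [htk1, htk0, List.append_assoc, List.append_assoc, List.singleton_append,
        List.singleton_append]
      rw [ih (ons.getD (k + 1) 0 :: X) (offs.getD k 0 :: Y) (by omega)]
      have hd : dropB ons offs msp k = false := by
        simp only [dropB, decide_eq_false_iff_not]; exact h
      simp [keptOns, keptOffs, List.range'_concat, hd]
      rw [Nat.add_comm 1 k]

theorem mem_Dm_iff (ons offs : List Int) (msp : Int) (m : Nat) (x : Int) :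
    x ∈ Dm ons offs msp m ↔ ∃ a : Nat, a < m ∧ dropB ons offs msp a = true ∧ (a : Int) = x := by
  simp [Dm, List.mem_range]
  tauto

theorem B_drop (ons offs : List Int) (msp : Int) (m : Nat) (d : PySem.Set Int)
    (hm : m + 1 ≤ offs.length) (hlen : offs.length ≤ ons.length) (hdn : ∀ x ∈ d, x < 0) :
    (PySem.List.pyRange 0 (m : Int) 1).foldl (bodyB ons offs msp) (some d)
    = some (d ++ Dm ons offs msp m) := by
  induction m generalizing d with
  | zero => simp [PySem.List.pyRange_one_eq_nil, Dm]
  | succ k ih =>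
    have h1 : ((k + 1 : Nat) : Int) = (k : Int) + 1 := by push_cast; ring
    rw [h1, PySem.List.pyRange_one_succ_right (by positivity), List.foldl_append]
    rw [ih d (by omega) hdn]
    simp only [List.foldl_cons, List.foldl_nil, bodyB]
    have hg1 : PySem.List.pyGet? ons ((k : Int) + 1) = some (ons.getD (k + 1) 0) := by
      rw [show ((k : Int) + 1) = ((k + 1 : Nat) : Int) by push_cast; ring,
        PySem.List.pyGet?_natCast, List.getElem?_eq_getElem (by omega)]
      rw [List.getD_eq_getElem _ _ (by omega)]
    have hg0 : PySem.List.pyGet? offs (k : Int) = some (offs.getD k 0) := by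
      rw [PySem.List.pyGet?_natCast, List.getElem?_eq_getElem (by omega)]
      rw [List.getD_eq_getElem _ _ (by omega)]
    rw [hg1, hg0]; dsimp only
    by_cases h : ons.getD (k + 1) 0 - offs.getD k 0 ≤ msp
    · rw [if_pos h]
      have hnm : ((k : Nat) : Int) ∉ d ++ Dm ons offs msp k := by
        intro hmem
        rcases List.mem_append.mp hmem with hx | hx
        · have := hdn _ hx; omega
        · rw [mem_Dm_iff] at hx
          rcases hx with ⟨a, ha, -, hc⟩
          omega
      rw [PySem.Set.add_of_not_mem hnm]
      have hd : dropB ons offs msp k = true := by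
        simp only [dropB, List.getD_eq_getElem?_getD] at h ⊢; simp; omega
      simp [Dm, List.range_succ, hd, List.append_assoc]
    · rw [if_neg h]
      have hd : dropB ons offs msp k = false := by
        simp only [dropB, decide_eq_false_iff_not]; exact h
      simp [Dm, List.range_succ, hd]

theorem filterMap_enumerate (l : List Int) (s : Nat) (C : Int → Bool) :
    (PySem.List.enumerate l (s : Int)).filterMap
        (fun jx => if C jx.1 then none else some jx.2)
    = ((List.range l.length).filter (fun j => !C ((s + j : Nat) : Int))).map
        (fun j => l.getD j 0) := by
  induction l generalizing s with
  | nil => simp [PySem.List.enumerate_nil]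
  | cons x xs ih =>
    rw [PySem.List.enumerate_cons, List.length_cons, List.range_succ_eq_map]
    rw [List.filterMap_cons]
    have hcast : (s : Int) + 1 = ((s + 1 : Nat) : Int) := by push_cast; ring
    rw [hcast, ih]
    simp only [List.filter_cons, List.filter_map]
    by_cases h : C (s : Int) <;>
      · simp [h, Function.comp_def]
        congr 1
        apply List.filter_congr
        intro j _
        congr 2
        ring

theorem map_getD_range' (l : List Int) (s : Nat) :
    (List.range' s (l.length - s)).map (fun j => l.getD j 0) = l.drop s := by
  apply List.ext_getElem
  · simp
  · intro i h1 h2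
    simp only [List.length_map, List.length_range'] at h1
    simp only [List.length_drop] at h2
    simp [List.getElem_range', List.getD_eq_getElem?_getD,
      List.getElem?_eq_getElem (show s + i < l.length by omega)]

theorem range_split_ons (n m : Nat) (h : 2 ≤ n) (hm : n ≤ m) :
    List.range m = List.range' 0 1 ++ List.range' 1 (n - 1) ++ List.range' n (m - n) := by
  rw [List.range_eq_range', List.append_assoc]
  rw [show List.range' n (m - n) = List.range' (1 + 1 * (n - 1)) (m - n) by congr 1; omega,
    List.range'_append]
  rw [show List.range' 1 (n - 1 + (m - n)) = List.range' (0 + 1 * 1) (n - 1 + (m - n)) from rfl,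
    List.range'_append]
  congr 1; omega

theorem range_split_offs (n : Nat) (h : 2 ≤ n) :
    List.range n = List.range' 0 (n - 1) ++ List.range' (n - 1) (n - (n - 1)) := by
  rw [List.range_eq_range']
  rw [show List.range' (n - 1) (n - (n - 1))
      = List.range' (0 + 1 * (n - 1)) (n - (n - 1)) by congr 1; omega,
    List.range'_append]
  congr 1; omega

theorem take_out_short_off_onset_spec : Claim_equal_take_out_short_off_onset := by
  intro ons offs mtp sf _ hpre
  unfold Spec_take_out_short_off_onset
  simp only [take_out_short_off_onset, take_out_short_off_onset_alt]
  by_cases hn : offs.length ≤ 1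
  · -- both loops are empty: A returns (ons, offs), B marks nothing
    rw [PySem.List.pyRange_neg_one_eq_nil (by omega), PySem.List.pyRange_one_eq_nil (by omega)]
    simp [PySem.List.map_snd_enumerate]
  · have hn2 : 2 ≤ offs.length := by omega
    have hlen : offs.length ≤ ons.length := by
      rcases hpre with h | h
      · omega
      · exact h
    rw [show ((offs.length : Int) - 2) = ((offs.length - 1 : Nat) : Int) - 1 by omega]
    rw [show ((offs.length : Int) - 1) = ((offs.length - 1 : Nat) : Int) by omega]
    rw [show (some (ons, offs) : Option (List Int × List Int))
        = some (ons.take ((offs.length - 1) + 1) ++ ons.drop offs.length,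
                offs.take (offs.length - 1) ++ offs.drop (offs.length - 1)) by
      rw [show (offs.length - 1) + 1 = offs.length by omega]
      simp]
    rw [A_loop ons offs (mtp * sf) (offs.length - 1) _ _ (by omega) hlen]
    rw [B_drop ons offs (mtp * sf) (offs.length - 1) PySem.Set.empty (by omega) hlen
      (by intro x hx; simp [PySem.Set.empty] at hx)]
    dsimp only
    simp only [PySem.Set.empty, List.nil_append]
    have hB1 := filterMap_enumerate ons 0
      (fun j => decide (j - 1 ∈ (Dm ons offs (mtp * sf) (offs.length - 1) : PySem.Set Int)))
    have hB2 := filterMap_enumerate offs 0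
      (fun j => decide (j ∈ (Dm ons offs (mtp * sf) (offs.length - 1) : PySem.Set Int)))
    rw [show ((0 : Nat) : Int) = (0 : Int) from rfl] at hB1 hB2
    simp only [decide_eq_true_eq, Nat.zero_add] at hB1 hB2
    rw [Option.getD_some]
    have honsC : List.take 1 ons ++ keptOns ons offs (mtp * sf) (offs.length - 1)
          ++ List.drop offs.length ons
        = ((List.range ons.length).filter
            (fun j : Nat => !decide ((j : Int) - 1 ∈ Dm ons offs (mtp * sf) (offs.length - 1)))).map
            (fun j => ons.getD j 0) := by
      rw [range_split_ons offs.length ons.length hn2 hlen,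
        List.filter_append, List.filter_append, List.map_append, List.map_append]
      congr 1
      · congr 1
        · -- index 0 is always kept
          rw [List.range'_one]
          have h0 : ((-1 : Int)) ∉ Dm ons offs (mtp * sf) (offs.length - 1) := by
            rw [mem_Dm_iff]
            rintro ⟨a, -, -, ha⟩
            omega
          cases ons with
          | nil => rw [List.length_nil] at hlen; omega
          | cons a t => simp [h0]
        · -- indices 1..n-1: kept iff the gap before them is long
          unfold keptOns
          congr 1
          apply List.filter_congr
          intro j hj
          rw [List.mem_range'_1] at hj
          congr 1
          unfold dropB
          rw [decide_eq_decide, mem_Dm_iff]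
          constructor
          · intro hle
            refine ⟨j - 1, by omega, ?_, by omega⟩
            simp only [dropB, decide_eq_true_eq]
            exact hle
          · rintro ⟨a, ha, hd, hc⟩
            have haj : a = j - 1 := by omega
            subst haj
            simp only [dropB, decide_eq_true_eq] at hd
            exact hd
      · -- indices ≥ n are always kept
        have hall : (List.range' offs.length (ons.length - offs.length)).filter
              (fun j : Nat => !decide ((j : Int) - 1 ∈ Dm ons offs (mtp * sf) (offs.length - 1)))
            = List.range' offs.length (ons.length - offs.length) := by
          rw [List.filter_eq_self]
          intro j hj
          rw [List.mem_range'_1] at hj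
          simp only [Bool.not_eq_true', decide_eq_false_iff_not, mem_Dm_iff]
          rintro ⟨a, ha, -, hc⟩
          omega
        rw [hall, map_getD_range']
    have hoffsC : keptOffs ons offs (mtp * sf) (offs.length - 1)
          ++ List.drop (offs.length - 1) offs
        = ((List.range offs.length).filter
            (fun j : Nat => !decide ((j : Int) ∈ Dm ons offs (mtp * sf) (offs.length - 1)))).map
            (fun j => offs.getD j 0) := by
      rw [range_split_offs offs.length hn2,
        List.filter_append, List.map_append]
      congr 1
      · -- indices 0..n-2: kept iff the gap after them is long
        unfold keptOffs
        congr 1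
        apply List.filter_congr
        intro j hj
        rw [List.mem_range'_1] at hj
        congr 1
        rw [show dropB ons offs (mtp * sf) j
            = decide (dropB ons offs (mtp * sf) j = true) by simp]
        rw [decide_eq_decide, mem_Dm_iff]
        constructor
        · intro hd
          exact ⟨j, by omega, hd, rfl⟩
        · rintro ⟨a, ha, hd, hc⟩
          have haj : a = j := by omega
          subst haj
          exact hd
      · -- the last offset is always kept
        have hall : (List.range' (offs.length - 1) (offs.length - (offs.length - 1))).filter
              (fun j : Nat => !decide ((j : Int) ∈ Dm ons offs (mtp * sf) (offs.length - 1)))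
            = List.range' (offs.length - 1) (offs.length - (offs.length - 1)) := by
          rw [List.filter_eq_self]
          intro j hj
          rw [List.mem_range'_1] at hj
          simp only [Bool.not_eq_true', decide_eq_false_iff_not, mem_Dm_iff]
          rintro ⟨a, ha, -, hc⟩
          omega
        rw [hall, map_getD_range']
    exact Prod.ext (honsC.trans hB1.symm) (hoffsC.trans hB2.symm)
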